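-- pv_equiv track=rewrite | github.com/abaveja313/code-robustness | src/shared/program_utils.py | truncate_to_indent
-- ===== SOURCE A (Python) =====
-- def truncate_to_indent(code: str):
--     """
--     Truncate the code to the last non-empty line with an indentation level of greater
--     than 0 or 1.
--
--     Useful for removing evaluation lines that got through the stop sequences
--     """
--     lines = code.splitlines()
--     if not lines:
--         return code
--
--     idx = len(lines) - 1
--     while len(lines[idx]) - len(lines[idx].lstrip()) <= 1:
--         idx -= 1
--         if idx < 0:
--             raise ValueError("Could not find any non-empty line to truncate to")
--
--     return "\n".join(lines[: idx + 1])
-- ===== SOURCE B (Python) =====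
-- def truncate_to_indent(code: str):
--     """Single forward pass keeping the last index whose line is indented by more than 1."""
--     lines = code.splitlines()
--     if not lines:
--         return code
--
--     last = None
--     for i, line in enumerate(lines):
--         if len(line) - len(line.lstrip()) > 1:
--             last = i
--
--     if last is None:
--         raise ValueError("Could not find any non-empty line to truncate to")
--
--     return "\n".join(lines[: last + 1])
-- ===== Notes on version B (the rewrite author's own statement) =====
-- stated objective: alternative
-- what changed: Backward while-loop scan with early exit replaced by a single forward pass over enumerate(lines) maintaining a last-matching-index accumulator.
import Mathlib
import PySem

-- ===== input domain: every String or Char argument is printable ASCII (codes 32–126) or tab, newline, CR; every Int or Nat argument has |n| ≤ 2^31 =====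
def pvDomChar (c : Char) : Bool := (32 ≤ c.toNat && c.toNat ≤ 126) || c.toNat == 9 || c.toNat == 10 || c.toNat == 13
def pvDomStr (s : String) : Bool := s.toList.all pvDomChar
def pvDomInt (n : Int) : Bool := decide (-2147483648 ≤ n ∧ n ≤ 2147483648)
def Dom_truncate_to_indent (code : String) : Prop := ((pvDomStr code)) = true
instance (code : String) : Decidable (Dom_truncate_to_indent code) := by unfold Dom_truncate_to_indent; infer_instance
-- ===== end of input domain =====

-- B replaces A's backward early-exit while-loop by a single forward pass keeping the last index
-- whose line has indentation greater than 1 (alternative decomposition, same cost).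


-- ===== PORT A =====
-- len(line) - len(line.lstrip())
def pvIndent (l : String) : Int := PySem.Str.len l - PySem.Str.len (PySem.Str.lstrip l)

-- A's backward while-loop: scan from index i downward; none = Python's ValueError
def pvScanBack (lines : List String) : Nat → Option Nat
  | 0 => if pvIndent (lines.getD 0 "") ≤ 1 then none else some 0
  | i+1 => if pvIndent (lines.getD (i+1) "") ≤ 1 then pvScanBack lines i else some (i+1)

def truncate_to_indent (code : String) : String :=
  let lines := PySem.Str.splitlines code
  if lines = [] then code
  else
    match pvScanBack lines (lines.length - 1) with
    | none => ""   -- Python raises ValueError here; excluded by Pre_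
    | some i => PySem.Str.join "\n" (lines.take (i + 1))

-- ===== PORT B =====
-- B's forward pass over enumerate(lines): keep the last index whose indent exceeds 1
def pvScanFwd (lines : List String) : Option Nat :=
  lines.zipIdx.foldl (fun acc p => if 1 < pvIndent p.1 then some p.2 else acc) none

def truncate_to_indent_alt (code : String) : String :=
  let lines := PySem.Str.splitlines code
  if lines = [] then code
  else
    match pvScanFwd lines with
    | none => ""   -- Python raises ValueError here; excluded by Pre_
    | some i => PySem.Str.join "\n" (lines.take (i + 1))

-- ===== PRECONDITION & SPEC =====
-- Pre_ excludes exactly the inputs where A (and B) raise ValueError: a non-empty set of lines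
-- none of which is indented by more than one character.
def Pre_truncate_to_indent (code : String) : Prop :=
  PySem.Str.splitlines code = [] ∨ ∃ l ∈ PySem.Str.splitlines code, 1 < pvIndent l
instance (code : String) : Decidable (Pre_truncate_to_indent code) := by
  unfold Pre_truncate_to_indent; infer_instance

def pvWitness_truncate_to_indent : String := "  x"

def Spec_truncate_to_indent (code : String) (out : String) : Prop := out = truncate_to_indent_alt code
instance (code : String) (out : String) : Decidable (Spec_truncate_to_indent code out) := by
  unfold Spec_truncate_to_indent; infer_instance

-- ===== CLAIM (what is proved, stated in full; the proofs are below) =====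
def Claim_equal_truncate_to_indent : Prop := ∀ (code : String), Dom_truncate_to_indent code → Pre_truncate_to_indent code → Spec_truncate_to_indent code (truncate_to_indent code)

-- ===== LEMMAS AND PROOFS =====

-- indices below ls.length do not see an appended element
theorem pvScanBack_append (ls : List String) (l : String) :
    ∀ i, i < ls.length → pvScanBack (ls ++ [l]) i = pvScanBack ls i := by
  intro i
  induction i with
  | zero =>
      intro h
      simp [pvScanBack, List.getD, List.getElem_append_left, h]
  | succ i ih =>
      intro h
      have hi : i < ls.length := Nat.lt_of_succ_lt h
      simp only [pvScanBack, List.getD, List.getElem?_append_left h]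
      split
      · exact ih hi
      · rfl

theorem pvScanFwd_append (ls : List String) (l : String) :
    pvScanFwd (ls ++ [l]) = if 1 < pvIndent l then some ls.length else pvScanFwd ls := by
  simp [pvScanFwd, List.zipIdx_append, List.foldl_append]

-- the backward early-exit scan from the end equals the forward last-match scan
theorem pvScan_eq (lines : List String) :
    pvScanBack lines (lines.length - 1) = pvScanFwd lines := by
  induction lines using List.reverseRecOn with
  | nil => simp [pvScanBack, pvScanFwd, pvIndent, PySem.Str.len, PySem.Str.lstrip]
  | append_singleton ls l ih =>
      rw [pvScanFwd_append]
      have hlen : (ls ++ [l]).length - 1 = ls.length := by simp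
      rw [hlen]
      cases hls : ls.length with
      | zero =>
          have : ls = [] := List.eq_nil_of_length_eq_zero hls
          subst this
          simp only [pvScanBack, List.nil_append, List.getD]
          simp [pvScanFwd]
          split <;> rename_i h <;> simp_all
      | succ m =>
          simp only [pvScanBack, List.getD]
          have hidx : (ls ++ [l])[m+1]? = some l := by
            rw [← hls]
            simp
          simp only [hidx, Option.getD_some]
          by_cases h : 1 < pvIndent l
          · rw [if_neg (by omega : ¬ pvIndent l ≤ 1), if_pos h]
          · rw [if_pos (by omega : pvIndent l ≤ 1), if_neg h,
                pvScanBack_append ls l m (by omega), ← ih]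
            have hm : ls.length - 1 = m := by omega
            rw [hm]

-- ===== VERDICT (by name: the statement is the Claim_ definition above) =====
theorem truncate_to_indent_spec : Claim_equal_truncate_to_indent := by
  intro code _ _
  simp only [Spec_truncate_to_indent, truncate_to_indent, truncate_to_indent_alt, pvScan_eq]
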